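-- pv_equiv track=rewrite | github.com/zluo16/python-data-structures-and-algorithms | decreasing_ratings.py | count_decreasing_ratings
-- ===== SOURCE A (Python) =====
-- from typing import List
--
-- def check_slice(arr):
--     last_idx = len(arr) - 1
--     if arr[0] - arr[last_idx] != last_idx:
--         return False
--
--     arr_range = range(arr[0], arr[last_idx] - 1, -1)
--     return list(arr_range) == arr
--
-- def count_decreasing_ratings(ratings: List):
--     if len(ratings) < 0:
--         return 0
--
--     counts = 0
--
--     for i in range(0, len(ratings)):
--         for j in range(i, len(ratings)):
--             arr = ratings[i:j + 1]
--             if check_slice(arr):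
--                 counts += 1
--
--     return counts
-- ===== SOURCE B (Python) =====
-- def count_decreasing_ratings(ratings):
--     # Single right-to-left pass: `run` is the length of the maximal
--     # decrease-by-1 run starting at the current element; each element
--     # contributes `run` valid subarrays (those starting at it).
--     counts = 0
--     run = 0
--     nxt = None
--     for x in reversed(ratings):
--         if nxt is not None and x - nxt == 1:
--             run += 1
--         else:
--             run = 1
--         counts += run
--         nxt = x
--     return counts
-- ===== Notes on version B (the rewrite author's own statement) =====
-- stated objective: faster
-- what changed: Replaced the triple-nested scan (every (i,j) slice materialised and compared against a freshly built range list) with a single right-to-left pass that maintains the current decrease-by-1 run length and adds it per element.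
import Mathlib
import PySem

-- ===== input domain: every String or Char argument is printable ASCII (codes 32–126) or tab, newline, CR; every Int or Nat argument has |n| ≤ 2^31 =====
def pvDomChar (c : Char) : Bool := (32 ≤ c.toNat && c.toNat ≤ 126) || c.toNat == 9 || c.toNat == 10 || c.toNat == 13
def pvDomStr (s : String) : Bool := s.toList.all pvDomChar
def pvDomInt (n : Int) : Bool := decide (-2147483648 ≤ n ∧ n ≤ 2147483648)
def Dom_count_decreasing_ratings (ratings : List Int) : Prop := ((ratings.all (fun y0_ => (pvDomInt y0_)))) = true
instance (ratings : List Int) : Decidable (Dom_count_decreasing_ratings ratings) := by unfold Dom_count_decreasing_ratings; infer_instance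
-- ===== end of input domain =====

-- B replaces A's triple-nested slice scan with one right-to-left pass keeping the current
-- decrease-by-1 run length (objective: faster, O(n^3) → O(n)).

-- ===== PORT A =====
-- check_slice; Python raises IndexError on [], which never happens inside count_decreasing_ratings,
-- so the [] branch (false) is unreachable there.
def check_slice (arr : List Int) : Bool :=
  let lastIdx : Int := (arr.length : Int) - 1
  match PySem.List.pyGet? arr 0, PySem.List.pyGet? arr lastIdx with
  | some a0, some aL =>
      if a0 - aL ≠ lastIdx then false
      else PySem.List.pyRange a0 (aL - 1) (-1) == arr
  | _, _ => false

def count_decreasing_ratings (ratings : List Int) : Int :=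
  if (ratings.length : Int) < 0 then 0
  else
    (PySem.List.pyRange 0 (ratings.length : Int) 1).foldl (fun counts i =>
      (PySem.List.pyRange i (ratings.length : Int) 1).foldl (fun c j =>
        if check_slice (PySem.List.slice ratings (some i) (some (j + 1))) then c + 1 else c)
        counts) 0

-- ===== PORT B =====
def pvStep (st : Int × Int × Option Int) (x : Int) : Int × Int × Option Int :=
  let run : Int :=
    match st.2.2 with
    | some nx => if x - nx == 1 then st.2.1 + 1 else 1
    | none => 1
  (st.1 + run, run, some x)

def count_decreasing_ratings_alt (ratings : List Int) : Int :=
  (ratings.reverse.foldl pvStep (0, 0, none)).1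

-- ===== PRECONDITION & SPEC =====
def Spec_count_decreasing_ratings (ratings : List Int) (out : Int) : Prop := out = count_decreasing_ratings_alt ratings
instance (ratings : List Int) (out : Int) : Decidable (Spec_count_decreasing_ratings ratings out) := by unfold Spec_count_decreasing_ratings; infer_instance

-- ===== CLAIM (what is proved, stated in full; the proofs are below) =====
def Claim_equal_count_decreasing_ratings : Prop := ∀ (ratings : List Int), Dom_count_decreasing_ratings ratings → Spec_count_decreasing_ratings ratings (count_decreasing_ratings ratings)

-- ===== LEMMAS AND PROOFS =====

-- length of the maximal decrease-by-1 prefix run (≥ 1 on nonempty lists)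
def runLen : List Int → Int
  | [] => 0
  | [_] => 1
  | a :: b :: t => if a - b = 1 then runLen (b :: t) + 1 else 1

-- reference count: runs starting at each position
def refC : List Int → Int
  | [] => 0
  | x :: xs => runLen (x :: xs) + refC xs

-- the exact descending list a, a-1, …, of length n
def descFrom : Int → Nat → List Int
  | _, 0 => []
  | a, n + 1 => a :: descFrom (a - 1) n

theorem runLen_pos (a : Int) (t : List Int) : 1 ≤ runLen (a :: t) := by
  induction t generalizing a with
  | nil => simp [runLen]
  | cons b t ih =>
    by_cases h : a - b = 1
    · simp only [runLen, if_pos h]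
      linarith [ih b]
    · simp [runLen, h]

theorem runLen_le (a : Int) (t : List Int) : runLen (a :: t) ≤ (t.length : Int) + 1 := by
  induction t generalizing a with
  | nil => simp [runLen]
  | cons b t ih =>
    by_cases h : a - b = 1 <;> simp [runLen, h] <;> [linarith [ih b]; linarith [runLen_pos b t]]

theorem descFrom_eq_range_map (a : Int) (n : Nat) :
    descFrom a n = (List.range n).map (fun (k : Nat) => a - (k : Int)) := by
  induction n generalizing a with
  | zero => simp [descFrom]
  | succ n ih =>
    rw [List.range_succ_eq_map]
    simp only [descFrom, List.map_cons, List.map_map, ih]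
    refine List.cons_eq_cons.mpr ⟨by simp, ?_⟩
    apply List.map_congr_left; intro k _; simp; ring

theorem pyRange_descFrom (a : Int) (n : Nat) :
    PySem.List.pyRange a (a - (n : Int)) (-1) = descFrom a n := by
  rw [PySem.List.pyRange_neg_one, descFrom_eq_range_map]
  have h : (a - (a - (n : Int))).toNat = n := by omega
  rw [h]

theorem getLast?_descFrom (a : Int) (n : Nat) :
    (descFrom a (n + 1)).getLast? = some (a - (n : Int)) := by
  induction n generalizing a with
  | zero => simp [descFrom]
  | succ n ih =>
    rw [show descFrom a (n + 1 + 1) = a :: descFrom (a - 1) (n + 1) from rfl,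
        show descFrom (a - 1) (n + 1) = (a - 1) :: descFrom (a - 1 - 1) n from rfl,
        List.getLast?_cons_cons,
        ← show descFrom (a - 1) (n + 1) = (a - 1) :: descFrom (a - 1 - 1) n from rfl, ih]
    congr 1; push_cast; ring

-- characterisation of A's check_slice on nonempty lists
theorem check_slice_iff (a : Int) (t : List Int) :
    check_slice (a :: t) = true ↔ a :: t = descFrom a (t.length + 1) := by
  have hne : a :: t ≠ [] := by simp
  have hlen : ((a :: t).length : Int) - 1 = (t.length : Int) := by simp
  have hget0 : PySem.List.pyGet? (a :: t) 0 = some a := by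
    simp [PySem.List.pyGet?, PySem.List.pyIdx?]
  have hgetL : PySem.List.pyGet? (a :: t) ((t.length : Int))
      = some ((a :: t).getLast hne) := by
    rw [PySem.List.pyGet?_natCast, List.getLast_eq_getElem]
    simp only [List.length_cons, Nat.add_sub_cancel]
    exact List.getElem?_eq_getElem (by simp)
  have hred : check_slice (a :: t)
      = (if a - (a :: t).getLast hne ≠ (t.length : Int) then false
         else (PySem.List.pyRange a ((a :: t).getLast hne - 1) (-1) == a :: t)) := by
    unfold check_slice
    simp only [hget0, hlen, hgetL]
  rw [hred]
  constructor
  · intro h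
    by_cases hc : a - (a :: t).getLast hne = (t.length : Int)
    · rw [if_neg (by omega)] at h
      have hL : (a :: t).getLast hne = a - (t.length : Int) := by omega
      rw [hL] at h
      have he : a - (t.length : Int) - 1 = a - ((t.length + 1 : Nat) : Int) := by push_cast; ring
      rw [he, pyRange_descFrom] at h
      exact (beq_iff_eq.mp h).symm
    · rw [if_pos hc] at h
      cases h
  · intro h
    have hL : (a :: t).getLast hne = a - (t.length : Int) := by
      have h2 := getLast?_descFrom a t.length
      rw [← h] at h2
      rw [List.getLast?_eq_some_getLast hne] at h2
      exact Option.some.inj h2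
    rw [hL, if_neg (by omega)]
    have he : a - (t.length : Int) - 1 = a - ((t.length + 1 : Nat) : Int) := by push_cast; ring
    rw [he, pyRange_descFrom]
    exact beq_iff_eq.mpr h.symm

-- take k is an exact run iff k ≤ runLen
theorem take_desc_iff (t : List Int) (a : Int) (k : Nat) (h1 : 1 ≤ k) (h2 : k ≤ t.length + 1) :
    ((a :: t).take k = descFrom a k ↔ (k : Int) ≤ runLen (a :: t)) := by
  induction t generalizing a k with
  | nil =>
    have : k = 1 := by simp at h2; omega
    subst this
    simp [descFrom, runLen]
  | cons b t ih =>
    match k, h1 with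
    | 1, _ => simpa [descFrom] using runLen_pos a (b :: t)
    | (k' + 2), _ =>
      have hk' : 1 ≤ k' + 1 := by omega
      have hk'2 : k' + 1 ≤ t.length + 1 := by simpa using h2
      by_cases hab : a - b = 1
      · have hb : a - 1 = b := by omega
        rw [show (a :: b :: t).take (k' + 2) = a :: (b :: t).take (k' + 1) from rfl,
            show descFrom a (k' + 2) = a :: descFrom (a - 1) (k' + 1) from rfl, hb]
        simp only [List.cons.injEq, true_and]
        rw [ih b (k' + 1) hk' hk'2]
        simp only [runLen, if_pos hab]
        push_cast; constructor <;> intro <;> linarith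
      · constructor
        · intro h
          exfalso
          have : (a :: b :: t).take (k' + 2) = a :: b :: t.take k' := rfl
          rw [this, show descFrom a (k' + 2) = a :: (a - 1) :: descFrom (a - 1 - 1) k' from rfl] at h
          have : b = a - 1 := by
            have := (List.cons.injEq _ _ _ _).mp h
            have := (List.cons.injEq _ _ _ _).mp this.2
            omega
          omega
        · intro h
          exfalso
          simp only [runLen, if_neg hab] at h
          omega

-- count of k ∈ range n with k < r
theorem countP_range_lt (n : Nat) (r : Int) (h0 : 0 ≤ r) (hn : r ≤ (n : Int)) :
    ((List.range n).countP (fun (k : Nat) => decide ((k : Int) < r)) : Int) = r := by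
  induction n with
  | zero => simp only [List.range_zero, List.countP_nil, Nat.cast_zero]; omega
  | succ n ih =>
    rw [List.range_succ, List.countP_append, List.countP_cons, List.countP_nil]
    by_cases h : r ≤ (n : Int)
    · have hd : decide ((n : Int) < r) = false := by simp; omega
      have hih := ih h
      simp only [hd, Bool.false_eq_true, if_false]
      push_cast
      push_cast at hih
      omega
    · have hd : decide ((n : Int) < r) = true := by simp; omega
      have hall : (List.range n).countP (fun (k : Nat) => decide ((k : Int) < r)) = n := by
        rw [List.countP_eq_length.mpr]
        · exact List.length_range
        · intro k hk
          simp only [List.mem_range] at hk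
          simp
          omega
      simp only [hd, if_true, hall]
      push_cast
      omega

-- the inner loop of A, for start index (i : Int) = (k : Nat), counts runLen (drop k l)
theorem inner_count (l : List Int) (k : Nat) (hk : k < l.length) (acc : Int) :
    (PySem.List.pyRange (k : Int) (l.length : Int) 1).foldl (fun c j =>
      if check_slice (PySem.List.slice l (some (k : Int)) (some (j + 1))) then c + 1 else c) acc
      = acc + runLen (l.drop k) := by
  rw [PySem.List.foldl_if_add_one]
  congr 1
  have hd : l.drop k ≠ [] := by
    intro h
    have h2 := List.length_drop (l := l) (i := k)
    rw [h] at h2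
    simp at h2
    omega
  obtain ⟨a, t, hat⟩ := List.exists_cons_of_ne_nil hd
  have hlen_d : t.length + 1 = l.length - k := by
    have h2 := List.length_drop (l := l) (i := k)
    rw [hat] at h2
    simp at h2
    omega
  have hM : ((l.length : Int) - (k : Int)).toNat = l.length - k := by omega
  rw [PySem.List.pyRange_one, List.countP_map, hM]
  have hcong : List.countP
        ((fun j => check_slice (PySem.List.slice l (some (k : Int)) (some (j + 1)))) ∘
          (fun (m : Nat) => (k : Int) + (m : Int)))
        (List.range (l.length - k))
      = List.countP (fun (m : Nat) => decide ((m : Int) < runLen (l.drop k)))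
        (List.range (l.length - k)) := by
    apply List.countP_congr
    intro m hm
    simp only [List.mem_range] at hm
    simp only [Function.comp_apply]
    have hslice : PySem.List.slice l (some (k : Int)) (some ((k : Int) + (m : Int) + 1))
        = (l.drop k).take (m + 1) := by
      have he : (k : Int) + (m : Int) + 1 = ((k + (m + 1) : Nat) : Int) := by push_cast; ring
      rw [he, PySem.List.slice_natCast]
      congr 1
      omega
    have htake : (l.drop k).take (m + 1) = a :: t.take m := by rw [hat]; rfl
    have hlt : (t.take m).length = m := by simp; omega
    have hiff1 := check_slice_iff a (t.take m)
    rw [hlt] at hiff1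
    have hiff2 := take_desc_iff t a (m + 1) (by omega) (by omega)
    rw [show (a :: t).take (m + 1) = a :: t.take m from rfl] at hiff2
    have harith : (((m + 1 : Nat)) : Int) ≤ runLen (a :: t) ↔ (m : Int) < runLen (a :: t) := by
      push_cast
      omega
    have key : (check_slice ((l.drop k).take (m + 1)) = true) ↔ ((m : Int) < runLen (l.drop k)) := by
      rw [htake, hat]
      exact (hiff1.trans hiff2).trans harith
    rw [hslice]
    by_cases hcs : check_slice ((l.drop k).take (m + 1)) = true
    · rw [hcs, (decide_eq_true (key.mp hcs)).symm]
    · have hnot : ¬ ((m : Int) < runLen (l.drop k)) := fun hh => hcs (key.mpr hh)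
      simp only [Bool.not_eq_true] at hcs
      rw [hcs, decide_eq_false hnot]
  rw [hcong]
  have h1 : 1 ≤ runLen (l.drop k) := by rw [hat]; exact runLen_pos a t
  have h2 : runLen (l.drop k) ≤ ((l.length - k : Nat) : Int) := by
    rw [hat]
    have h3 := runLen_le a t
    omega
  rw [countP_range_lt (l.length - k) (runLen (l.drop k)) (by omega) h2]

-- sum of runLen over all suffixes is refC
theorem sum_runLen_drop (l : List Int) :
    ((List.range l.length).map (fun k => runLen (l.drop k))).sum = refC l := by
  induction l with
  | nil => simp [refC]
  | cons x xs ih =>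
    rw [show (x :: xs).length = xs.length + 1 from rfl, List.range_succ_eq_map]
    simp only [List.map_cons, List.map_map, List.sum_cons, List.drop_zero]
    rw [refC, ← ih]
    congr 1

-- A computes refC
theorem portA_eq_refC (l : List Int) : count_decreasing_ratings l = refC l := by
  unfold count_decreasing_ratings
  rw [if_neg (by omega)]
  have hcong : (PySem.List.pyRange 0 (l.length : Int) 1).foldl (fun counts i =>
      (PySem.List.pyRange i (l.length : Int) 1).foldl (fun c j =>
        if check_slice (PySem.List.slice l (some i) (some (j + 1))) then c + 1 else c)
        counts) 0
      = (PySem.List.pyRange 0 (l.length : Int) 1).foldl (fun counts i =>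
          counts + runLen (l.drop i.toNat)) 0 := by
    apply PySem.List.foldl_congr_mem
    intro acc i hi
    rw [PySem.List.mem_pyRange_one] at hi
    have hk : i = ((i.toNat : Nat) : Int) := by omega
    have hklt : i.toNat < l.length := by omega
    rw [hk]
    exact inner_count l i.toNat hklt acc
  rw [hcong, PySem.List.foldl_add, zero_add, PySem.List.pyRange_one, List.map_map]
  have harg : ((l.length : Int) - 0).toNat = l.length := by omega
  rw [harg, ← sum_runLen_drop l]
  apply congrArg
  apply List.map_congr_left
  intro k _
  simp

-- B computes refC (with the full fold state made explicit)
theorem portB_state (l : List Int) :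
    l.reverse.foldl pvStep (0, 0, none) = (refC l, runLen l, l.head?) := by
  induction l with
  | nil => simp [refC, runLen]
  | cons x xs ih =>
    rw [List.reverse_cons, List.foldl_append, ih]
    cases xs with
    | nil => simp [pvStep, refC, runLen]
    | cons b t =>
      simp only [pvStep, List.foldl_cons, List.foldl_nil, List.head?_cons]
      by_cases h : x - b = 1
      · simp only [show (x - b == 1) = true by simpa using h]
        rw [show runLen (x :: b :: t) = runLen (b :: t) + 1 from by simp [runLen, h]]
        rw [show refC (x :: b :: t) = runLen (x :: b :: t) + refC (b :: t) from rfl]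
        simp [runLen, h]; ring
      · simp only [show (x - b == 1) = false by simpa using h]
        rw [show runLen (x :: b :: t) = 1 from by simp [runLen, h]]
        rw [show refC (x :: b :: t) = runLen (x :: b :: t) + refC (b :: t) from rfl]
        simp [runLen, h]; ring

theorem portB_eq_refC (l : List Int) : count_decreasing_ratings_alt l = refC l := by
  unfold count_decreasing_ratings_alt
  rw [portB_state]

-- ===== VERDICT (by name: the statement is the Claim_ definition above) =====
theorem count_decreasing_ratings_spec : Claim_equal_count_decreasing_ratings := by
  intro l _
  unfold Spec_count_decreasing_ratings
  rw [portA_eq_refC, portB_eq_refC]
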